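-- pv_equiv track=rewrite | github.com/iamheretodevelop/creators-domain | CS100/newoccurences.py | different_occurrences_count
-- ===== SOURCE A (Python) =====
-- def different_occurrences_count(items):
--     numbers = set(items)
--     repeated_number = 0
--     items.sort()
--     count = 0
--     for i in range(1, len(items) + 1):
--         if i not in numbers:
--             missing_number = i
--     for i in items:
--         if i == count:
--             repeated_number = i
--             break
--         count = i
--     return [repeated_number, missing_number]
-- ===== SOURCE B (Python) =====
-- def different_occurrences_count(items):
--     n = len(items)
--     present = set(items)
--     missing_number = 0
--     for i in range(n, 0, -1):
--         if i not in present: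
--             missing_number = i
--             break
--     counts = {}
--     for x in items:
--         counts[x] = counts.get(x, 0) + 1
--     dups = [v for v in counts if counts[v] > 1]
--     repeated_number = min(dups) if dups else 0
--     return [repeated_number, missing_number]
-- ===== Notes on version B (the rewrite author's own statement) =====
-- stated objective: alternative
-- what changed: B replaces A's in-place sort plus adjacent-pair scan with a counting-dict pass (smallest duplicated value = min of keys with count>1) and finds the largest missing value of 1..n by scanning the range downward to the first absence instead of keeping the last hit of an upward scan; B does not mutate the input list.
-- intended difference: On lists whose elements are all nonnegative with exactly one 0 and some duplicated value, A's sorted scan matches the head 0 against the count sentinel 0 and returns 0 as the repeated number even though a real duplicate exists, while B returns the smallest duplicated value, which is the intended answer for a find-the-duplicate function. — e.g. on different_occurrences_count([0, 2, 2]): A returns [0, 3], B returns [2, 3]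
import Mathlib
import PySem

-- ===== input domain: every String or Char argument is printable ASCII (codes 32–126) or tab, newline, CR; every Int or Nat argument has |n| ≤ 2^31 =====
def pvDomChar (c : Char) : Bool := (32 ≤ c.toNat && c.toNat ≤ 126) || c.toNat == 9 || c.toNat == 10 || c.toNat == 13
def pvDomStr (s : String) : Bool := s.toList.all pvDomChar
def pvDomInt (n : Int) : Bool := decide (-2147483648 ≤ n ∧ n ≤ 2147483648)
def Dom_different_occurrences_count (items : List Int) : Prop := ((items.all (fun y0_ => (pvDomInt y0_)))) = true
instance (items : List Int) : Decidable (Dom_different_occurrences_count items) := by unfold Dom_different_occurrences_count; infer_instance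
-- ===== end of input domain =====

-- B replaces A's sort+adjacent-scan by one counting pass and a downward range scan (alternative algorithm);
-- Python A additionally sorts `items` in place — the equivalence proved here is about the RETURN value only.

-- ===== PORT A =====
-- the `for i in items: if i == count: repeated_number = i; break; count = i` loop (count starts at 0)
def docLoopA : List Int → Int → Int
  | [], _ => 0
  | i :: rest, count => if i = count then i else docLoopA rest i

-- `for i in range(1, len(items)+1): if i not in numbers: missing_number = i` — none means missing_number
-- was never bound, i.e. the Python raises NameError (excluded by Pre_)
def docMissingA (items : List Int) : Option Int :=
  (PySem.List.pyRange 1 ((items.length : Int) + 1) 1).foldl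
    (fun acc i => if (PySem.Set.ofList items).contains i then acc else some i) none

def different_occurrences_count (items : List Int) : List Int :=
  [docLoopA (PySem.List.sorted items (fun x => x) false) 0, (docMissingA items).getD 0]

-- ===== PORT B =====
-- `for i in range(n, 0, -1): if i not in present: missing_number = i; break` (missing_number starts at 0)
def docMissingB (items : List Int) : Int :=
  match (PySem.List.pyRange (items.length : Int) 0 (-1)).find?
      (fun i => !(PySem.Set.ofList items).contains i) with
  | some i => i
  | none => 0

-- `counts[x] = counts.get(x, 0) + 1` over items
def docCountsB (items : List Int) : PySem.Dict Int Int :=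
  items.foldl (fun d x => d.insert x (d.getD x 0 + 1)) PySem.Dict.empty

-- `dups = [v for v in counts if counts[v] > 1]; min(dups) if dups else 0`
def docRepB (items : List Int) : Int :=
  match PySem.List.min?
      ((docCountsB items).keys.filter (fun v => 1 < (docCountsB items).getD v 0)) (fun v => v) with
  | some m => m
  | none => 0

def different_occurrences_count_alt (items : List Int) : List Int :=
  [docRepB items, docMissingB items]

-- ===== PRECONDITION & SPEC =====
-- Pre_ excludes exactly the inputs where Python A raises NameError: no value of 1..len(items) is missing,
-- so missing_number is never assigned.
def Pre_different_occurrences_count (items : List Int) : Prop :=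
  ∃ i ∈ PySem.List.pyRange 1 ((items.length : Int) + 1) 1, i ∉ items
instance (items : List Int) : Decidable (Pre_different_occurrences_count items) := by
  unfold Pre_different_occurrences_count; infer_instance

def pvWitness_different_occurrences_count : List Int := [2, 2]

-- On lists of all-nonnegative elements containing exactly one 0 and some duplicated value, A returns 0 as the
-- repeated number (its sorted scan matches the head 0 against the initial count sentinel 0), while B returns the
-- smallest actually duplicated value, which is the intended answer for a find-the-repeated-value function.
def D_different_occurrences_count (items : List Int) : Prop :=
  (∀ x ∈ items, 0 ≤ x) ∧ items.count 0 = 1 ∧ ∃ v ∈ items, 1 < items.count v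
instance (items : List Int) : Decidable (D_different_occurrences_count items) := by
  unfold D_different_occurrences_count; infer_instance

def Spec_different_occurrences_count (items : List Int) (out : List Int) : Prop :=
  ¬ D_different_occurrences_count items → out = different_occurrences_count_alt items
instance (items : List Int) (out : List Int) : Decidable (Spec_different_occurrences_count items out) := by
  unfold Spec_different_occurrences_count; infer_instance

def pvDiffWitness_different_occurrences_count : List Int := [0, 2, 2]
def pvDiffWitnessOut_different_occurrences_count : (List Int) × (List Int) := ([0, 3], [2, 3])

-- ===== CLAIM (what is proved, stated in full; the proofs are below) =====
def Claim_unchanged_different_occurrences_count : Prop := ∀ (items : List Int), Dom_different_occurrences_count items → Pre_different_occurrences_count items → Spec_different_occurrences_count items (different_occurrences_count items)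
def Claim_changed_different_occurrences_count : Prop := Dom_different_occurrences_count (pvDiffWitness_different_occurrences_count) ∧ Pre_different_occurrences_count (pvDiffWitness_different_occurrences_count) ∧ D_different_occurrences_count (pvDiffWitness_different_occurrences_count) ∧ different_occurrences_count (pvDiffWitness_different_occurrences_count) = pvDiffWitnessOut_different_occurrences_count.1 ∧ different_occurrences_count_alt (pvDiffWitness_different_occurrences_count) = pvDiffWitnessOut_different_occurrences_count.2 ∧ pvDiffWitnessOut_different_occurrences_count.1 ≠ pvDiffWitnessOut_different_occurrences_count.2
def Claim_exact_different_occurrences_count : Prop := ∀ (items : List Int), Dom_different_occurrences_count items → Pre_different_occurrences_count items → D_different_occurrences_count items → different_occurrences_count items ≠ different_occurrences_count_alt items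

-- ===== LEMMAS AND PROOFS =====

-- the value both repeated-number computations are characterized by: smallest duplicated value, else 0
def RepSpec (l : List Int) (r : Int) : Prop :=
  (1 < l.count r ∧ ∀ v, 1 < l.count v → r ≤ v) ∨ ((∀ v, l.count v ≤ 1) ∧ r = 0)

theorem repSpec_unique {l : List Int} {r r' : Int} (h : RepSpec l r) (h' : RepSpec l r') : r = r' := by
  rcases h with ⟨hc, hmin⟩ | ⟨hub, hr⟩ <;> rcases h' with ⟨hc', hmin'⟩ | ⟨hub', hr'⟩
  · exact le_antisymm (hmin _ hc') (hmin' _ hc)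
  · exact absurd hc (not_lt.mpr (hub' r))
  · exact absurd hc' (not_lt.mpr (hub r'))
  · rw [hr, hr']

theorem repSpec_perm {l l' : List Int} {r : Int} (hp : l.Perm l') (h : RepSpec l r) : RepSpec l' r := by
  rcases h with ⟨hc, hmin⟩ | ⟨hub, hr⟩
  · exact Or.inl ⟨by rw [← hp.count_eq]; exact hc, fun v hv => hmin v (by rw [hp.count_eq]; exact hv)⟩
  · exact Or.inr ⟨fun v => by rw [← hp.count_eq]; exact hub v, hr⟩

theorem count_cons_int (a v : Int) (l : List Int) :
    (a :: l).count v = l.count v + (if a = v then 1 else 0) := by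
  simp [List.count_cons]

theorem repSpec_cons_of_not_mem {a : Int} {l : List Int} {r : Int}
    (hnm : a ∉ l) (h : RepSpec l r) : RepSpec (a :: l) r := by
  have hz : l.count a = 0 := List.count_eq_zero.mpr hnm
  rcases h with ⟨hc, hmin⟩ | ⟨hub, hr⟩
  · refine Or.inl ⟨?_, ?_⟩
    · have hra : a ≠ r := by
        intro hra; rw [← hra] at hc; omega
      rw [count_cons_int, if_neg hra]; omega
    · intro v hv
      by_cases hva : a = v
      · rw [count_cons_int, if_pos hva, ← hva, hz] at hv; omega
      · rw [count_cons_int, if_neg hva] at hv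
        exact hmin v (by omega)
  · refine Or.inr ⟨?_, hr⟩
    intro v
    by_cases hva : a = v
    · rw [count_cons_int, if_pos hva, ← hva, hz]
    · rw [count_cons_int, if_neg hva]
      have := hub v; omega

-- a `last match wins` fold is find? on the reversed list
theorem foldl_last_eq_find?_reverse (q : Int → Bool) :
    ∀ (l : List Int) (acc : Option Int),
      l.foldl (fun a i => if q i then a else some i) acc
        = match l.reverse.find? (fun i => !q i) with
          | some x => some x
          | none => acc := by
  intro l
  induction l with
  | nil => intro acc; rfl
  | cons i t ih =>
    intro acc
    simp only [List.foldl_cons, List.reverse_cons, List.find?_append, ih]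
    cases hf : t.reverse.find? (fun i => !q i) with
    | some x => simp
    | none =>
      cases hq : q i <;> simp [hq]

theorem missing_eq (items : List Int) :
    (docMissingA items).getD 0 = docMissingB items := by
  unfold docMissingA docMissingB
  rw [PySem.List.pyRange_neg_one_eq_reverse]
  rw [foldl_last_eq_find?_reverse (fun i => (PySem.Set.ofList items).contains i)]
  norm_num
  split <;> rfl

theorem docRepB_spec (items : List Int) : RepSpec items (docRepB items) := by
  unfold docRepB docCountsB
  rw [PySem.Dict.foldl_insert_getD_add_one_eq_counter]
  simp only [PySem.Dict.keys_counter, PySem.Dict.getD_counter]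
  cases hm : PySem.List.min?
      ((PySem.Set.ofList items).filter (fun v => decide (1 < (items.count v : Int)))) (fun v => v) with
  | none =>
    refine Or.inr ⟨?_, rfl⟩
    intro v
    by_contra hgt
    rw [not_le] at hgt
    have hvmem : v ∈ items := List.count_pos_iff.mp (by omega)
    have hvd : v ∈ (PySem.Set.ofList items).filter (fun v => decide (1 < (items.count v : Int))) := by
      rw [List.mem_filter]
      exact ⟨(by rw [PySem.Set.mem_ofList]; exact hvmem), by simp; exact_mod_cast hgt⟩
    rw [PySem.List.min?_eq_none_iff] at hm
    rw [hm] at hvd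
    simp at hvd
  | some m =>
    have hmem := PySem.List.min?_mem hm
    rw [List.mem_filter] at hmem
    obtain ⟨hmk, hmc⟩ := hmem
    simp only [decide_eq_true_eq] at hmc
    refine Or.inl ⟨by exact_mod_cast hmc, ?_⟩
    intro v hv
    have hvmem : v ∈ items := List.count_pos_iff.mp (by omega)
    have hvd : v ∈ (PySem.Set.ofList items).filter (fun v => decide (1 < (items.count v : Int))) := by
      rw [List.mem_filter]
      exact ⟨(by rw [PySem.Set.mem_ofList]; exact hvmem), by simp; exact_mod_cast hv⟩
    exact PySem.List.min?_isMin hm v hvd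

theorem loopA_spec : ∀ (t : List Int) (a : Int),
    (a :: t).Pairwise (· ≤ ·) → RepSpec (a :: t) (docLoopA t a) := by
  intro t
  induction t with
  | nil =>
    intro a _
    refine Or.inr ⟨?_, rfl⟩
    intro v
    rw [count_cons_int]
    simp only [List.count_nil]
    split_ifs <;> omega
  | cons b t' ih =>
    intro a hp
    obtain ⟨hhead, hp'⟩ := List.pairwise_cons.mp hp
    have hab : a ≤ b := hhead b (by simp)
    by_cases hba : b = a
    · subst hba
      show RepSpec (b :: b :: t') (if b = b then b else docLoopA t' b)
      rw [if_pos rfl]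
      refine Or.inl ⟨?_, ?_⟩
      · rw [count_cons_int, count_cons_int, if_pos rfl]; omega
      · intro v hv
        have hvmem : v ∈ b :: b :: t' := List.count_pos_iff.mp (by omega)
        rcases List.mem_cons.mp hvmem with rfl | h2
        · exact le_refl _
        · rcases List.mem_cons.mp h2 with rfl | h3
          · exact le_refl _
          · exact hhead v (by simp [h3])
    · show RepSpec (a :: b :: t') (if b = a then b else docLoopA t' b)
      rw [if_neg hba]
      have hnm : a ∉ b :: t' := by
        intro hmem
        rcases List.mem_cons.mp hmem with rfl | hmem
        · exact hba rfl
        · have hb := (List.pairwise_cons.mp hp').1 a hmem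
          have : a < b := lt_of_le_of_ne hab (fun h => hba h.symm)
          omega
      exact repSpec_cons_of_not_mem hnm (ih b hp')

theorem loopA_sorted_spec (items : List Int)
    (hD : ¬ D_different_occurrences_count items) :
    RepSpec items (docLoopA (PySem.List.sorted items (fun x => x) false) 0) := by
  have hperm : (PySem.List.sorted items (fun x => x) false).Perm items := PySem.List.sorted_perm items (fun x => x) false
  have hpw : (PySem.List.sorted items (fun x => x) false).Pairwise (· ≤ ·) :=
    PySem.List.sorted_pairwise items (fun x => x)
  refine repSpec_perm hperm ?_
  cases hs : PySem.List.sorted items (fun x => x) false with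
  | nil => exact Or.inr ⟨fun v => by simp, rfl⟩
  | cons a t =>
    rw [hs] at hperm hpw
    obtain ⟨hhead, hp'⟩ := List.pairwise_cons.mp hpw
    by_cases ha : a = 0
    · subst ha
      show RepSpec ((0:Int) :: t) (if (0:Int) = 0 then (0:Int) else docLoopA t 0)
      rw [if_pos rfl]
      have hall : ∀ x ∈ (0:Int) :: t, (0:Int) ≤ x := by
        intro x hx
        rcases List.mem_cons.mp hx with rfl | hx
        · exact le_refl _
        · exact hhead x hx
      by_cases h2 : 2 ≤ ((0:Int) :: t).count 0
      · exact Or.inl ⟨by omega, fun v hv => hall v (List.count_pos_iff.mp (by omega))⟩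
      · refine Or.inr ⟨?_, rfl⟩
        intro v
        by_contra hgt
        rw [not_le] at hgt
        apply hD
        refine ⟨?_, ?_, ⟨v, ?_, ?_⟩⟩
        · intro x hx
          exact hall x (hperm.mem_iff.mpr hx)
        · rw [← hperm.count_eq]
          have h1 : 1 ≤ ((0:Int) :: t).count 0 := by
            rw [count_cons_int]; simp
          omega
        · exact hperm.mem_iff.mp (List.count_pos_iff.mp (by omega))
        · rw [← hperm.count_eq]; omega
    · show RepSpec (a :: t) (if a = 0 then a else docLoopA t a)
      rw [if_neg ha]
      exact loopA_spec t a hpw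

-- ===== VERDICT =====
theorem different_occurrences_count_spec : Claim_unchanged_different_occurrences_count := by
  intro items _ _
  unfold Spec_different_occurrences_count
  intro hD
  unfold different_occurrences_count different_occurrences_count_alt
  rw [missing_eq items]
  rw [repSpec_unique (loopA_sorted_spec items hD) (docRepB_spec items)]

theorem different_occurrences_count_changed : Claim_changed_different_occurrences_count := by
  unfold Claim_changed_different_occurrences_count; decide

theorem different_occurrences_count_tight : Claim_exact_different_occurrences_count := by
  unfold Claim_exact_different_occurrences_count
  intro items _ _ hD heq
  obtain ⟨hpos, hc0, v, hv, hvc⟩ := hD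
  have h0mem : (0:Int) ∈ items := List.count_pos_iff.mp (by omega)
  have hBspec := docRepB_spec items
  have hBne : docRepB items ≠ 0 := by
    rcases hBspec with ⟨hc, _⟩ | ⟨hub, _⟩
    · intro h; rw [h] at hc; omega
    · exact absurd hvc (not_lt.mpr (hub v))
  cases hs : PySem.List.sorted items (fun x => x) false with
  | nil =>
    have hmem : (0:Int) ∈ PySem.List.sorted items (fun x => x) false := by
      rw [PySem.List.mem_sorted]; exact h0mem
    rw [hs] at hmem
    simp at hmem
  | cons a t =>
    have hpw := PySem.List.sorted_pairwise items (fun x => x)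
    have hmem0 : (0:Int) ∈ PySem.List.sorted items (fun x => x) false := by
      rw [PySem.List.mem_sorted]; exact h0mem
    have hmema : a ∈ items := by
      rw [← PySem.List.mem_sorted (key := fun x => x) (rev := false)]
      rw [hs]; simp
    rw [hs] at hpw hmem0
    obtain ⟨hhead, -⟩ := List.pairwise_cons.mp hpw
    have ha0 : a = 0 := by
      have h2 : 0 ≤ a := hpos a hmema
      rcases List.mem_cons.mp hmem0 with h | h
      · omega
      · have h1 : a ≤ (0:Int) := hhead 0 h
        omega
    subst ha0
    unfold different_occurrences_count different_occurrences_count_alt at heq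
    rw [hs] at heq
    have hfirst : docLoopA ((0:Int) :: t) 0 = docRepB items := (List.cons.injEq _ _ _ _).mp heq |>.1
    rw [show docLoopA ((0:Int) :: t) 0 = 0 from by simp [docLoopA]] at hfirst
    exact hBne hfirst.symm
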